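-- pv_equiv track=rewrite | github.com/SophiaMFerreira/Simulated_Annealing_Roteamento_Robo | RR_SA_NadineSophia.py | removeCiclos
-- ===== SOURCE A (Python) =====
-- def removeCiclos(rota, inicioCorte, fimCorte):
--     if(len(rota) < 2):
--         return rota;
--
--     if(rota[inicioCorte] in rota[fimCorte:]):
--         return removeCiclos(rota, inicioCorte, fimCorte + 1);
--
--     elif(inicioCorte != fimCorte):
--         rota = rota[:inicioCorte + 1] + rota[fimCorte:];
--         inicioCorte = 0;
--         fimCorte = 0;
--         return rota;
-- ===== SOURCE B (Python) =====
-- def removeCiclos(rota, inicioCorte, fimCorte):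
--     if len(rota) < 2:
--         return rota
--     v = rota[inicioCorte]
--     if v in rota[fimCorte:]:
--         fimCorte = len(rota) - rota[::-1].index(v)
--     return rota[:inicioCorte + 1] + rota[fimCorte:]
-- ===== Notes on version B (the rewrite author's own statement) =====
-- stated objective: alternative
-- what changed: A searches for the splice point by recursing with fimCorte+1 and re-scanning rota[fimCorte:] for membership at every step; B finds the last occurrence of rota[inicioCorte] with one backward scan (rota[::-1].index) and builds the spliced route with a single slice concatenation, no recursion; Pre_ excludes only the inputs where A raises IndexError (len(rota) >= 2 with inicioCorte out of range).
import Mathlib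
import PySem

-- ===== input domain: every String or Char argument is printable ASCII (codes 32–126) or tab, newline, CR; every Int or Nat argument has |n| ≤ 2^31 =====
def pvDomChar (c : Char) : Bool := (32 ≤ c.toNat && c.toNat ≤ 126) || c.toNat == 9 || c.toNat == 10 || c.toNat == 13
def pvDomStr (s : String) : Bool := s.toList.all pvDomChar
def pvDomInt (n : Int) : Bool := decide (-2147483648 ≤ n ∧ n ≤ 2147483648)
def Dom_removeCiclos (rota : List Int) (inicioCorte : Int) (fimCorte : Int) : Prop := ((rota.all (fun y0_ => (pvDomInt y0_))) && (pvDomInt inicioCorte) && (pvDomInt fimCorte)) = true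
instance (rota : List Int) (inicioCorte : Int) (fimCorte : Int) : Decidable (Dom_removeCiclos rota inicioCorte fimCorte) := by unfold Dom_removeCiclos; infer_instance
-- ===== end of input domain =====

-- B replaces A's recursive repeated-membership search by one backward scan for the last
-- occurrence of rota[inicioCorte] plus a single splice (objective: alternative).


-- termination helper for port A: recursion only happens while rota[fimCorte:] is nonempty
theorem pv_lt_of_mem_slice_from {v : Int} {xs : List Int} {a : Int}
    (h : v ∈ PySem.List.slice xs (some a) none) : a < (xs.length : Int) := by
  by_cases ha : a < 0
  · exact lt_of_lt_of_le ha (by exact_mod_cast Int.natCast_nonneg xs.length)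
  · rw [PySem.List.slice_from xs (by omega)] at h
    have hne : xs.drop a.toNat ≠ [] := by
      intro hnil; rw [hnil] at h; exact List.not_mem_nil h
    rw [ne_eq, List.drop_eq_nil_iff] at hne
    omega

-- ===== PORT A =====
def removeCiclos (rota : List Int) (inicioCorte : Int) (fimCorte : Int) : List Int :=
  if rota.length < 2 then rota
  else
    match PySem.List.pyGet? rota inicioCorte with
    | none => []   -- rota[inicioCorte] raises IndexError; excluded by Pre_
    | some v =>
      if v ∈ PySem.List.slice rota (some fimCorte) none then
        removeCiclos rota inicioCorte (fimCorte + 1)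
      else if inicioCorte ≠ fimCorte then
        PySem.List.slice rota none (some (inicioCorte + 1)) ++
          PySem.List.slice rota (some fimCorte) none
      else []   -- Python falls off the end returning None; excluded by Pre_
termination_by ((rota.length : Int) - fimCorte).toNat
decreasing_by
  have := pv_lt_of_mem_slice_from ‹_›
  omega

-- ===== PORT B =====
def removeCiclos_alt (rota : List Int) (inicioCorte : Int) (fimCorte : Int) : List Int :=
  if rota.length < 2 then rota
  else
    match PySem.List.pyGet? rota inicioCorte with
    | none => []   -- rota[inicioCorte] raises IndexError; excluded by Pre_
    | some v =>
      let f : Int :=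
        if v ∈ PySem.List.slice rota (some fimCorte) none then
          -- fimCorte = len(rota) - rota[::-1].index(v); v ∈ rota here so .index cannot raise
          (rota.length : Int) - ((PySem.List.index? rota.reverse v).getD 0 : Nat)
        else fimCorte
      PySem.List.slice rota none (some (inicioCorte + 1)) ++
        PySem.List.slice rota (some f) none

-- ===== PRECONDITION & SPEC =====
-- Pre_ excludes exactly the inputs where Python A does not return normally: when len(rota) ≥ 2
-- and inicioCorte is out of range, rota[inicioCorte] raises IndexError.
def Pre_removeCiclos (rota : List Int) (inicioCorte : Int) (fimCorte : Int) : Prop :=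
  rota.length < 2 ∨ (-(rota.length : Int) ≤ inicioCorte ∧ inicioCorte < (rota.length : Int))
instance (rota : List Int) (inicioCorte : Int) (fimCorte : Int) : Decidable (Pre_removeCiclos rota inicioCorte fimCorte) := by unfold Pre_removeCiclos; infer_instance
def pvWitness_removeCiclos : List Int × Int × Int := ([1, 2, 1, 3], 0, 1)

def Spec_removeCiclos (rota : List Int) (inicioCorte : Int) (fimCorte : Int) (out : List Int) : Prop := out = removeCiclos_alt rota inicioCorte fimCorte
instance (rota : List Int) (inicioCorte : Int) (fimCorte : Int) (out : List Int) : Decidable (Spec_removeCiclos rota inicioCorte fimCorte out) := by unfold Spec_removeCiclos; infer_instance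

-- ===== CLAIM (what is proved, stated in full; the proofs are below) =====
def Claim_equal_removeCiclos : Prop := ∀ (rota : List Int) (inicioCorte : Int) (fimCorte : Int), Dom_removeCiclos rota inicioCorte fimCorte → Pre_removeCiclos rota inicioCorte fimCorte → Spec_removeCiclos rota inicioCorte fimCorte (removeCiclos rota inicioCorte fimCorte)

-- ===== LEMMAS AND PROOFS =====

-- the index of the LAST occurrence of v in rota (meaningful when v ∈ rota)
def pvJ (rota : List Int) (v : Int) : Nat :=
  rota.length - 1 - (PySem.List.index? rota.reverse v).getD 0

-- the tail both programs append after rota[:inicioCorte+1]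
def pvTail (rota : List Int) (v : Int) (f : Int) : List Int :=
  if v ∈ PySem.List.slice rota (some f) none then rota.drop (pvJ rota v + 1)
  else PySem.List.slice rota (some f) none

theorem pvJ_spec (rota : List Int) (v : Int) (hv : v ∈ rota) :
    pvJ rota v < rota.length ∧ rota[pvJ rota v]? = some v ∧
      (∀ m : Nat, pvJ rota v < m → rota[m]? ≠ some v) ∧
      ((pvJ rota v : Int) = (rota.length : Int) - 1 - ((PySem.List.index? rota.reverse v).getD 0 : Nat)) := by
  have hvr : v ∈ rota.reverse := by simpa using hv
  have hsome : (PySem.List.index? rota.reverse v).isSome = true :=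
    (PySem.List.index?_isSome_iff _ _).mpr hvr
  obtain ⟨k, hk⟩ := Option.isSome_iff_exists.mp hsome
  obtain ⟨hklt, hget, hfirst⟩ := PySem.List.getElem_of_index?_eq_some hk
  rw [List.length_reverse] at hklt
  have hk' : List.idxOf? v rota.reverse = some k := by simpa using hk
  have hJ : pvJ rota v = rota.length - 1 - k := by simp [pvJ, hk']
  have hgetJ : rota[rota.length - 1 - k]'(by omega) = v := by
    rw [← hget]; rw [List.getElem_reverse]
  refine ⟨by omega, ?_, ?_, ?_⟩
  · rw [hJ, List.getElem?_eq_getElem (by omega), hgetJ]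
  · intro m hm hcon
    have hmlt : m < rota.length := by
      by_contra hge
      rw [List.getElem?_eq_none (by omega)] at hcon
      simp at hcon
    rw [List.getElem?_eq_getElem hmlt] at hcon
    have hmv : rota[m]'hmlt = v := Option.some.inj hcon
    have : rota.reverse[rota.length - 1 - m]'(by rw [List.length_reverse]; omega) ≠ v := by
      apply hfirst; rw [hJ] at hm; omega
    apply this
    rw [List.getElem_reverse]
    have : rota.length - 1 - (rota.length - 1 - m) = m := by omega
    simp_rw [this]; exact hmv
  · rw [hJ, hk]; simp; omega

theorem pv_mem_drop_iff (rota : List Int) (v : Int) (hv : v ∈ rota) (s : Nat) :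
    v ∈ rota.drop s ↔ s ≤ pvJ rota v := by
  obtain ⟨hlt, hget, hlast, -⟩ := pvJ_spec rota v hv
  constructor
  · intro hmem
    obtain ⟨t, ht, hgt⟩ := List.mem_iff_getElem.mp hmem
    rw [List.getElem_drop] at hgt
    have hst : s + t < rota.length := by have := List.length_drop (i := s) (l := rota); omega
    by_contra hgtJ
    exact hlast (s + t) (by omega) (by rw [List.getElem?_eq_getElem hst, hgt])
  · intro hs
    have hlen : pvJ rota v - s < (rota.drop s).length := by rw [List.length_drop]; omega
    have : (rota.drop s)[pvJ rota v - s]'hlen = v := by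
      rw [List.getElem_drop]
      have hi : s + (pvJ rota v - s) = pvJ rota v := by omega
      simp_rw [hi]
      have := List.getElem?_eq_getElem (l := rota) (i := pvJ rota v) hlt
      rw [this] at hget; exact Option.some.inj hget
    rw [← this]; exact List.getElem_mem _

theorem pv_clampIdx_int (len : Nat) (a : Int) :
    (PySem.List.clampIdx len a : Int) = if a < 0 then max 0 ((len : Int) + a) else min a len := by
  by_cases ha : a < 0
  · have hrw : a = -(((-a).toNat : Nat) : Int) := by omega
    rw [if_pos ha, hrw, PySem.List.clampIdx_neg_natCast len _ (by omega)]
    omega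
  · have hrw : a = ((a.toNat : Nat) : Int) := by omega
    rw [if_neg ha, hrw, PySem.List.clampIdx_natCast]
    omega

theorem pv_mem_slice_iff (rota : List Int) (v : Int) (hv : v ∈ rota) (f : Int) :
    v ∈ PySem.List.slice rota (some f) none ↔
      ((PySem.List.clampIdx rota.length f : Nat) : Int) ≤ (pvJ rota v : Int) := by
  rw [PySem.List.slice_some_none, pv_mem_drop_iff rota v hv]
  exact_mod_cast Iff.rfl

-- v = rota[i] always lies in rota[i:]
theorem pv_self_mem_slice (rota : List Int) (i v : Int)
    (hget : PySem.List.pyGet? rota i = some v) : v ∈ PySem.List.slice rota (some i) none := by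
  have hrange : PySem.Raise.InRange rota.length i := by
    by_contra hc
    rw [← PySem.List.pyGet?_eq_none_iff] at hc
    rw [hc] at hget; simp at hget
  obtain ⟨h1, h2⟩ := hrange
  have hv : v ∈ rota := PySem.List.mem_of_pyGet?_eq_some rota hget
  rw [pv_mem_slice_iff rota v hv]
  obtain ⟨hlt, -, hlast, -⟩ := pvJ_spec rota v hv
  have hclamp := pv_clampIdx_int rota.length i
  by_cases hi : i < 0
  · have hk : i = -(((-i).toNat : Nat) : Int) := by omega
    rw [hk, PySem.List.pyGet?_neg_natCast rota _ (by omega) (by omega)] at hget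
    have hJ : rota.length - (-i).toNat ≤ pvJ rota v := by
      by_contra hgt; exact hlast _ (by omega) hget
    rw [if_pos hi] at hclamp; omega
  · have hk : i = ((i.toNat : Nat) : Int) := by omega
    rw [hk, PySem.List.pyGet?_natCast] at hget
    have hJ : i.toNat ≤ pvJ rota v := by
      by_contra hgt; exact hlast _ (by omega) hget
    rw [if_neg hi] at hclamp; omega

theorem pv_tail_invariant (rota : List Int) (v f : Int) (hv : v ∈ rota)
    (hmem : v ∈ PySem.List.slice rota (some f) none) :
    pvTail rota v f = pvTail rota v (f + 1) := by
  rw [pvTail, pvTail, if_pos hmem]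
  by_cases hm1 : v ∈ PySem.List.slice rota (some (f + 1)) none
  · rw [if_pos hm1]
  · rw [if_neg hm1]
    rw [pv_mem_slice_iff rota v hv] at hmem hm1
    have h1 := pv_clampIdx_int rota.length f
    have h2 := pv_clampIdx_int rota.length (f + 1)
    have hclamp : PySem.List.clampIdx rota.length (f + 1) = pvJ rota v + 1 := by
      split_ifs at h1 h2 <;> omega
    rw [PySem.List.slice_some_none, hclamp]

-- B's port, rewritten through pvTail
theorem pv_alt_eq (rota : List Int) (i f v : Int) (h2 : ¬ rota.length < 2)
    (hget : PySem.List.pyGet? rota i = some v) :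
    removeCiclos_alt rota i f =
      PySem.List.slice rota none (some (i + 1)) ++ pvTail rota v f := by
  have hv : v ∈ rota := PySem.List.mem_of_pyGet?_eq_some rota hget
  obtain ⟨hlt, -, -, hcast⟩ := pvJ_spec rota v hv
  rw [removeCiclos_alt, if_neg h2, hget]
  dsimp only
  rw [pvTail]
  by_cases hmem : v ∈ PySem.List.slice rota (some f) none
  · rw [if_pos hmem, if_pos hmem]
    congr 1
    have heq : (rota.length : Int) - ((PySem.List.index? rota.reverse v).getD 0 : Nat)
        = ((pvJ rota v + 1 : Nat) : Int) := by push_cast; omega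
    rw [heq, PySem.List.slice_from rota (by positivity), Int.toNat_natCast]
  · rw [if_neg hmem, if_neg hmem]

-- A's recursion computes the same splice
theorem pv_A_eq (rota : List Int) (i v : Int) (h2 : ¬ rota.length < 2)
    (hget : PySem.List.pyGet? rota i = some v) :
    ∀ (N : Nat) (f : Int), ((rota.length : Int) - f).toNat ≤ N →
      removeCiclos rota i f =
        PySem.List.slice rota none (some (i + 1)) ++ pvTail rota v f := by
  have hv : v ∈ rota := PySem.List.mem_of_pyGet?_eq_some rota hget
  intro N
  induction N with
  | zero =>
    intro f hf
    by_cases hmem : v ∈ PySem.List.slice rota (some f) none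
    · have := pv_lt_of_mem_slice_from hmem; omega
    · rw [removeCiclos, if_neg h2, hget]
      dsimp only
      rw [if_neg hmem]
      have hne : i ≠ f := by
        intro hif; exact hmem (hif ▸ pv_self_mem_slice rota i v hget)
      rw [if_pos hne, pvTail, if_neg hmem]
  | succ N ih =>
    intro f hf
    by_cases hmem : v ∈ PySem.List.slice rota (some f) none
    · have hfn := pv_lt_of_mem_slice_from hmem
      rw [removeCiclos, if_neg h2, hget]
      dsimp only
      rw [if_pos hmem]
      rw [ih (f + 1) (by omega)]
      rw [pv_tail_invariant rota v f hv hmem]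
    · rw [removeCiclos, if_neg h2, hget]
      dsimp only
      rw [if_neg hmem]
      have hne : i ≠ f := by
        intro hif; exact hmem (hif ▸ pv_self_mem_slice rota i v hget)
      rw [if_pos hne, pvTail, if_neg hmem]

-- ===== VERDICT (by name: the statement is the Claim_ definition above) =====
theorem removeCiclos_spec : Claim_equal_removeCiclos := by
  intro rota i f _hdom hpre
  unfold Spec_removeCiclos
  by_cases h2 : rota.length < 2
  · rw [removeCiclos, removeCiclos_alt, if_pos h2, if_pos h2]
  · have hrange : PySem.Raise.InRange rota.length i := by
      rcases hpre with h | h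
      · exact absurd h h2
      · exact ⟨h.1, h.2⟩
    obtain ⟨v, hget⟩ : ∃ v, PySem.List.pyGet? rota i = some v := by
      cases hg : PySem.List.pyGet? rota i with
      | none => exact absurd hrange ((PySem.List.pyGet?_eq_none_iff rota i).mp hg)
      | some v => exact ⟨v, rfl⟩
    rw [pv_A_eq rota i v h2 hget (((rota.length : Int) - f).toNat) f le_rfl,
      pv_alt_eq rota i f v h2 hget]
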